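-- pv_equiv track=rewrite | github.com/Aw3ra/dougbert | src/handlers/twitter_functions/post_tweet.py | split_text_by_punctuation
-- ===== SOURCE A (Python) =====
-- def split_text_by_punctuation(text, max_chars=280):
--     # Split the text by punctuation
--     split_text = []
--     # Set the remaining text to the text
--     remaining_text = text
--     # While the remaining text is longer than 280 characters
--     while len(remaining_text) > max_chars:
--         # Find the last period
--         last_period_index = remaining_text[:max_chars+1].rfind('.')
--         # Check if the last period is greater than 0
--         if last_period_index > 0:
--             # Append the text
--             split_text.append(remaining_text[:last_period_index+1].strip())
--             # Set the remaining text
--             remaining_text = remaining_text[last_period_index+1:].strip()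
--         else:
--             # Append the text
--             split_text.append(remaining_text[:max_chars].strip())
--             # Set the remaining text
--             remaining_text = remaining_text[max_chars:].strip()
--     # Check if the remaining text is greater than 0
--     if len(remaining_text) > 0:
--         # Append the remaining text
--         split_text.append(remaining_text)
--     # Return the split text
--     return split_text
-- ===== SOURCE B (Python) =====
-- def split_text_by_punctuation(text, max_chars=280):
--     n = len(text)
--     # One pass over the text: prev_dot[k] = index of the last '.' at or before k, else -1.
--     prev_dot = [0] * n
--     last = -1
--     for k in range(n):
--         if text[k] == '.':
--             last = k
--         prev_dot[k] = last
--     chunks = []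
--     # The remaining text is always text[i:j]; only emitted chunks are ever sliced.
--     i, j = 0, n
--     while j - i > max_chars:
--         e = min(i + max_chars + 1, j)
--         p = prev_dot[e - 1]
--         if p > i:
--             chunks.append(text[i:p + 1].strip())
--             i = p + 1
--         else:
--             chunks.append(text[i:i + max_chars].strip())
--             i += max_chars
--         # emulate .strip() of the remainder by moving the cursors
--         while i < j and text[i].isspace():
--             i += 1
--         while j > i and text[j - 1].isspace():
--             j -= 1
--     if j > i:
--         chunks.append(text[i:j])
--     return chunks
-- ===== Notes on version B (the rewrite author's own statement) =====
-- stated objective: alternative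
-- what changed: Instead of repeatedly slicing and re-stripping the whole remaining string (A copies the suffix and rescans the window with rfind on every iteration), B precomputes a last-period-index table in one pass and walks the text with two integer cursors, emulating strip by skipping whitespace at the cursors and slicing only the emitted chunks; this avoids A's quadratic suffix copying but pays a per-character table-building pass, so it is not measurably faster on typical inputs.
-- outside the precondition, e.g. on split_text_by_punctuation('', 0): A returns [], B returns []; on split_text_by_punctuation(' ', 0): A returns [''], B returns ['']
import Mathlib
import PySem

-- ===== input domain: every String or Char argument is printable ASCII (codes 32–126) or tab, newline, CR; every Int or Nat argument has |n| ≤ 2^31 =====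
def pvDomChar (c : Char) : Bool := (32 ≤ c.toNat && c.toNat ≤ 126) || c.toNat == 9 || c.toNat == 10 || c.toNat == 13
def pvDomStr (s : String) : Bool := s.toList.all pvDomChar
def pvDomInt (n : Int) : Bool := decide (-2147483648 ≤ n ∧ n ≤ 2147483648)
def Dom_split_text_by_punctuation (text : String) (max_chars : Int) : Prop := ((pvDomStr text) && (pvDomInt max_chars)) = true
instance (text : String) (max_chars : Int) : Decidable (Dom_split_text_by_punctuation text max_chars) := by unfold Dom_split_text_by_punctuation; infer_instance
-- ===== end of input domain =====

-- B re-implements the chunker with a one-pass last-period table and integer cursors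
-- (only emitted chunks are sliced); equivalence of return values is proved on max_chars ≥ 1.

-- ===== PORT A =====
-- the while loop of A, one fuel unit per iteration; returns (remaining_text, split_text)
def pvLoopA (max_chars : Int) : Nat → List Char → List String → (List Char × List String)
  | 0, rem, acc => (rem, acc)
  | fuel+1, rem, acc =>
    if (rem.length : Int) > max_chars then
      let idx := PySem.Chars.rfind (PySem.List.slice rem none (some (max_chars+1))) ['.']
      if idx > 0 then
        pvLoopA max_chars fuel
          (PySem.Chars.strip (PySem.List.slice rem (some (idx+1)) none))
          (acc ++ [String.ofList (PySem.Chars.strip (PySem.List.slice rem none (some (idx+1))))])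
      else
        pvLoopA max_chars fuel
          (PySem.Chars.strip (PySem.List.slice rem (some max_chars) none))
          (acc ++ [String.ofList (PySem.Chars.strip (PySem.List.slice rem none (some max_chars)))])
    else (rem, acc)

def split_text_by_punctuation (text : String) (max_chars : Int) : List String :=
  let cs := text.toList
  let r := pvLoopA max_chars (cs.length + 1) cs []
  if (r.1.length : Int) > 0 then r.2 ++ [String.ofList r.1] else r.2

-- ===== PORT B =====
-- prev_dot table: entry k is the index of the last '.' at or before k, else `last`
def pvPrevDot : List Char → Int → Int → List Int
  | [], _, _ => []
  | c :: rest, k, last =>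
    let last' := if c = '.' then k else last
    last' :: pvPrevDot rest (k+1) last'

-- while i < j and text[i].isspace(): i += 1   (index always in range there, so pyGetD is exact)
def pvSkipL (cs : List Char) (i j : Int) : Int :=
  if h : i < j ∧ PySem.Chars.isspace (PySem.List.pyGetD cs i ' ') = true then
    pvSkipL cs (i+1) j
  else i
termination_by (j - i).toNat
decreasing_by omega

-- while j > i and text[j-1].isspace(): j -= 1
def pvSkipR (cs : List Char) (i j : Int) : Int :=
  if h : j > i ∧ PySem.Chars.isspace (PySem.List.pyGetD cs (j-1) ' ') = true then
    pvSkipR cs i (j-1)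
  else j
termination_by (j - i).toNat
decreasing_by omega

-- the while loop of B; returns (i, j, chunks)
def pvLoopB (cs : List Char) (prev : List Int) (max_chars : Int) :
    Nat → Int → Int → List String → (Int × Int × List String)
  | 0, i, j, acc => (i, j, acc)
  | fuel+1, i, j, acc =>
    if j - i > max_chars then
      let e := min (i + max_chars + 1) j
      let p := PySem.List.pyGetD prev (e-1) (-1)   -- prev_dot[e-1]; in range under Pre_
      if p > i then
        let acc' := acc ++ [String.ofList (PySem.Chars.strip (PySem.List.slice cs (some i) (some (p+1))))]
        let i' := pvSkipL cs (p+1) j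
        let j' := pvSkipR cs i' j
        pvLoopB cs prev max_chars fuel i' j' acc'
      else
        let acc' := acc ++ [String.ofList (PySem.Chars.strip (PySem.List.slice cs (some i) (some (i+max_chars))))]
        let i' := pvSkipL cs (i+max_chars) j
        let j' := pvSkipR cs i' j
        pvLoopB cs prev max_chars fuel i' j' acc'
    else (i, j, acc)

def split_text_by_punctuation_alt (text : String) (max_chars : Int) : List String :=
  let cs := text.toList
  let prev := pvPrevDot cs 0 (-1)
  let r := pvLoopB cs prev max_chars (cs.length + 1) 0 (cs.length : Int) []
  if r.2.1 > r.1 then r.2.2 ++ [String.ofList (PySem.List.slice cs (some r.1) (some r.2.1))] else r.2.2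

-- ===== PRECONDITION & SPEC =====
-- Pre_ excludes max_chars ≤ 0: there Python A loops forever on every text whose strip is
-- non-empty (and on the empty text when max_chars < 0); on the few max_chars ≤ 0 inputs
-- where A does return (whitespace-only text with max_chars = 0) B returns the same value anyway.
def Pre_split_text_by_punctuation (text : String) (max_chars : Int) : Prop := 1 ≤ max_chars
instance (text : String) (max_chars : Int) : Decidable (Pre_split_text_by_punctuation text max_chars) := by
  unfold Pre_split_text_by_punctuation; infer_instance

def pvWitness_split_text_by_punctuation : String × Int := ("ab. cd. e", 5)

def Spec_split_text_by_punctuation (text : String) (max_chars : Int) (out : List String) : Prop := out = split_text_by_punctuation_alt text max_chars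
instance (text : String) (max_chars : Int) (out : List String) : Decidable (Spec_split_text_by_punctuation text max_chars out) := by unfold Spec_split_text_by_punctuation; infer_instance

-- ===== CLAIM (what is proved, stated in full; the proofs are below) =====
def Claim_equal_split_text_by_punctuation : Prop := ∀ (text : String) (max_chars : Int), Dom_split_text_by_punctuation text max_chars → Pre_split_text_by_punctuation text max_chars → Spec_split_text_by_punctuation text max_chars (split_text_by_punctuation text max_chars)

-- ===== LEMMAS AND PROOFS =====

-- index of the last '.' in a list, -1 if none (spec function for rfind and pvPrevDot)
def ldot : List Char → Int
  | [] => -1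
  | c :: r => if 0 ≤ ldot r then ldot r + 1 else if c = '.' then 0 else -1

theorem ldot_ge (s : List Char) : -1 ≤ ldot s := by
  induction s with
  | nil => simp [ldot]
  | cons c r ih => simp only [ldot]; split_ifs <;> omega

theorem ldot_lt (s : List Char) : ldot s < s.length := by
  induction s with
  | nil => simp [ldot]
  | cons c r ih => simp only [ldot, List.length_cons]; split_ifs <;> push_cast <;> omega

theorem ldot_append (xs ys : List Char) :
    ldot (xs ++ ys) = if 0 ≤ ldot ys then xs.length + ldot ys else ldot xs := by
  induction xs with
  | nil =>
    simp only [List.nil_append, List.length_nil, Nat.cast_zero, ldot]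
    have := ldot_ge ys; split_ifs <;> omega
  | cons c r ih =>
    have := ldot_ge ys
    simp only [List.cons_append, ldot, ih, List.length_cons]
    split_ifs <;> push_cast <;> omega

theorem rfind_go_eq (s : List Char) : ∀ m : Nat, PySem.Chars.rfind.go s ['.'] m = ldot (s.take (m+1)) := by
  intro m
  induction m with
  | zero =>
    rw [PySem.Chars.rfind.go]
    cases s with
    | nil => simp [ldot, List.isPrefixOf]
    | cons c r =>
      by_cases hc : c = '.'
      · simp [List.isPrefixOf, hc, ldot]
      · have hcc : ¬ ('.' = c) := fun h => hc h.symm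
        simp [List.isPrefixOf, hc, ldot, hcc]
  | succ m ih =>
    rw [PySem.Chars.rfind.go]
    by_cases h : m + 1 < s.length
    · have htake : s.take (m+2) = s.take (m+1) ++ [s[m+1]] := by
        rw [List.take_succ]; simp [List.getElem?_eq_getElem h]
      have hlen : (s.take (m+1)).length = m+1 := by simp; omega
      have hpre : List.isPrefixOf ['.'] (s.drop (m+1)) = (s[m+1] == '.') := by
        rw [List.drop_eq_getElem_cons h]
        simp [List.isPrefixOf, BEq.comm]
      rw [htake, ldot_append, hpre, hlen]
      by_cases hc : s[m+1] = '.'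
      · simp [hc, ldot]
      · simp [hc, ldot, ih]
    · have h1 : s.drop (m+1) = [] := by rw [List.drop_eq_nil_iff]; omega
      have h2 : s.take (m+2) = s := List.take_of_length_le (by omega)
      have h3 : s.take (m+1) = s := List.take_of_length_le (by omega)
      rw [h1, h2] at *
      simp [List.isPrefixOf, ih, h3]

theorem rfind_dot (s : List Char) : PySem.Chars.rfind s ['.'] = ldot s := by
  rw [show PySem.Chars.rfind s ['.'] = PySem.Chars.rfind.go s ['.'] s.length from rfl,
    rfind_go_eq, List.take_of_length_le (by omega)]

theorem pvPrevDot_getD (cs : List Char) : ∀ (m : Nat) (k last : Int), m < cs.length →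
    (pvPrevDot cs k last).getD m (-1)
      = if 0 ≤ ldot (cs.take (m+1)) then k + ldot (cs.take (m+1)) else last := by
  induction cs with
  | nil => intro m k last h; simp at h
  | cons c r ih =>
    intro m k last h
    cases m with
    | zero =>
      by_cases hc : c = '.' <;> simp [pvPrevDot, hc, ldot]
    | succ m' =>
      have hstep : (pvPrevDot (c :: r) k last).getD (m'+1) (-1)
          = (pvPrevDot r (k+1) (if c = '.' then k else last)).getD m' (-1) := by
        simp [pvPrevDot]
      rw [hstep, ih m' (k+1) (if c = '.' then k else last) (by simpa using h)]
      have htake : (c :: r).take (m'+1+1) = c :: r.take (m'+1) := rfl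
      rw [htake]
      have := ldot_ge (r.take (m'+1))
      simp only [ldot]
      by_cases h0 : 0 ≤ ldot (r.take (m'+1)) <;> by_cases hc : c = '.' <;>
        simp [h0, hc] <;> split_ifs <;> omega

theorem lstrip_seg (cs : List Char) : ∀ (d a b : Nat), b - a = d → a ≤ b → b ≤ cs.length →
    ∃ a₂ : Nat, a ≤ a₂ ∧ a₂ ≤ b ∧ pvSkipL cs a b = (a₂ : Int) ∧
      PySem.Chars.lstrip ((cs.drop a).take (b-a)) = (cs.drop a₂).take (b-a₂) := by
  intro d
  induction d using Nat.strong_induction_on with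
  | _ d ihd =>
  intro a b hd hab hb
  rw [pvSkipL]
  by_cases hcond : (a:Int) < (b:Int) ∧ PySem.Chars.isspace (PySem.List.pyGetD cs (a:Int) ' ') = true
  · rw [dif_pos hcond]
    have halt : a < b := by exact_mod_cast hcond.1
    have ha : a < cs.length := by omega
    have hget : PySem.List.pyGetD cs (a:Int) ' ' = cs[a] := by
      rw [PySem.List.pyGetD_natCast]; exact List.getD_eq_getElem _ _ ha
    have hseg : (cs.drop a).take (b-a) = cs[a] :: (cs.drop (a+1)).take (b-(a+1)) := by
      rw [List.drop_eq_getElem_cons ha, show b - a = (b - (a+1)) + 1 by omega, List.take_succ_cons]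
    have hspace := hcond.2; rw [hget] at hspace
    obtain ⟨a₂, h1, h2, h3, h4⟩ := ihd (b - (a+1)) (by omega) (a+1) b rfl (by omega) hb
    refine ⟨a₂, by omega, h2, ?_, ?_⟩
    · rw [show (a:Int)+1 = ((a+1:Nat):Int) by push_cast; ring]; exact h3
    · rw [hseg]
      simpa [PySem.Chars.lstrip, List.dropWhile_cons, hspace] using h4
  · rw [dif_neg hcond]
    refine ⟨a, le_rfl, hab, rfl, ?_⟩
    by_cases hab' : a < b
    · have ha : a < cs.length := by omega
      have hget : PySem.List.pyGetD cs (a:Int) ' ' = cs[a] := by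
        rw [PySem.List.pyGetD_natCast]; exact List.getD_eq_getElem _ _ ha
      have hsp : PySem.Chars.isspace cs[a] = false := by
        rcases Bool.eq_false_or_eq_true (PySem.Chars.isspace cs[a]) with h' | h'
        · exact absurd ⟨by exact_mod_cast hab', by rw [hget]; exact h'⟩ hcond
        · exact h'
      have hseg : (cs.drop a).take (b-a) = cs[a] :: (cs.drop (a+1)).take (b-(a+1)) := by
        rw [List.drop_eq_getElem_cons ha, show b - a = (b - (a+1)) + 1 by omega, List.take_succ_cons]
      rw [hseg]
      simp [PySem.Chars.lstrip, List.dropWhile_cons, hsp]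
    · have hz : b - a = 0 := by omega
      simp [hz, PySem.Chars.lstrip]

theorem rstrip_append (xs : List Char) (c : Char) :
    PySem.Chars.rstrip (xs ++ [c]) = if PySem.Chars.isspace c then PySem.Chars.rstrip xs else xs ++ [c] := by
  by_cases h : PySem.Chars.isspace c <;>
    simp [PySem.Chars.rstrip, List.dropWhile_cons, h]

theorem rstrip_seg (cs : List Char) : ∀ (d a b : Nat), b - a = d → a ≤ b → b ≤ cs.length →
    ∃ b₂ : Nat, a ≤ b₂ ∧ b₂ ≤ b ∧ pvSkipR cs a b = (b₂ : Int) ∧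
      PySem.Chars.rstrip ((cs.drop a).take (b-a)) = (cs.drop a).take (b₂-a) := by
  intro d
  induction d using Nat.strong_induction_on with
  | _ d ihd =>
  intro a b hd hab hb
  rw [pvSkipR]
  by_cases hcond : (b:Int) > (a:Int) ∧ PySem.Chars.isspace (PySem.List.pyGetD cs ((b:Int)-1) ' ') = true
  · rw [dif_pos hcond]
    have halt : a < b := by exact_mod_cast hcond.1
    have hb1 : b - 1 < cs.length := by omega
    have hget : PySem.List.pyGetD cs ((b:Int)-1) ' ' = cs[b-1] := by
      rw [show (b:Int)-1 = ((b-1:Nat):Int) by push_cast [Nat.cast_sub (by omega : 1 ≤ b)]; ring,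
        PySem.List.pyGetD_natCast]
      exact List.getD_eq_getElem _ _ hb1
    have hspace := hcond.2; rw [hget] at hspace
    have hseg : (cs.drop a).take (b-a) = (cs.drop a).take (b-1-a) ++ [cs[b-1]] := by
      rw [show b - a = (b-1-a) + 1 by omega, List.take_succ]
      congr 1
      rw [List.getElem?_drop]
      simp [List.getElem?_eq_getElem (show a + (b-1-a) < cs.length by omega),
        show a + (b-1-a) = b-1 by omega]
    obtain ⟨b₂, h1, h2, h3, h4⟩ := ihd (b - 1 - a) (by omega) a (b-1) rfl (by omega) (by omega)
    refine ⟨b₂, h1, by omega, ?_, ?_⟩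
    · rw [show (b:Int)-1 = ((b-1:Nat):Int) by push_cast [Nat.cast_sub (by omega : 1 ≤ b)]; ring]
      exact h3
    · rw [hseg, rstrip_append, if_pos hspace]; exact h4
  · rw [dif_neg hcond]
    refine ⟨b, hab, le_rfl, rfl, ?_⟩
    by_cases hab' : a < b
    · have hb1 : b - 1 < cs.length := by omega
      have hget : PySem.List.pyGetD cs ((b:Int)-1) ' ' = cs[b-1] := by
        rw [show (b:Int)-1 = ((b-1:Nat):Int) by push_cast [Nat.cast_sub (by omega : 1 ≤ b)]; ring,
          PySem.List.pyGetD_natCast]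
        exact List.getD_eq_getElem _ _ hb1
      have hsp : PySem.Chars.isspace cs[b-1] = false := by
        rcases Bool.eq_false_or_eq_true (PySem.Chars.isspace cs[b-1]) with h' | h'
        · exact absurd ⟨by exact_mod_cast hab', by rw [hget]; exact h'⟩ hcond
        · exact h'
      have hseg : (cs.drop a).take (b-a) = (cs.drop a).take (b-1-a) ++ [cs[b-1]] := by
        rw [show b - a = (b-1-a) + 1 by omega, List.take_succ]
        congr 1
        rw [List.getElem?_drop]
        simp [List.getElem?_eq_getElem (show a + (b-1-a) < cs.length by omega),
          show a + (b-1-a) = b-1 by omega]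
      rw [hseg, rstrip_append, if_neg (by simp [hsp])]
    · have hz : b - a = 0 := by omega
      simp [hz, PySem.Chars.rstrip]

theorem strip_seg (cs : List Char) (a b : Nat) (hab : a ≤ b) (hb : b ≤ cs.length) :
    ∃ a₂ b₂ : Nat, a ≤ a₂ ∧ a₂ ≤ b₂ ∧ b₂ ≤ b ∧
      pvSkipL cs a b = (a₂ : Int) ∧ pvSkipR cs (a₂ : Int) b = (b₂ : Int) ∧
      PySem.Chars.strip ((cs.drop a).take (b-a)) = (cs.drop a₂).take (b₂-a₂) := by
  obtain ⟨a₂, l1, l2, l3, l4⟩ := lstrip_seg cs (b-a) a b rfl hab hb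
  obtain ⟨b₂, r1, r2, r3, r4⟩ := rstrip_seg cs (b-a₂) a₂ b rfl l2 hb
  exact ⟨a₂, b₂, l1, r1, r2, l3, r3, by rw [PySem.Chars.strip, l4, r4]⟩

theorem loop_eq (cs : List Char) (max : Int) (hmax : 1 ≤ max) :
    ∀ (fuel : Nat) (i j : Nat) (acc : List String), i ≤ j → j ≤ cs.length →
    ∃ (i' j' : Nat), i' ≤ j' ∧ j' ≤ cs.length ∧
      pvLoopB cs (pvPrevDot cs 0 (-1)) max fuel (i:Int) (j:Int) acc
        = ((i':Int), (j':Int), (pvLoopA max fuel ((cs.drop i).take (j-i)) acc).2) ∧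
      (pvLoopA max fuel ((cs.drop i).take (j-i)) acc).1 = (cs.drop i').take (j'-i') := by
  intro fuel
  induction fuel with
  | zero =>
    intro i j acc hij hj
    exact ⟨i, j, hij, hj, by simp [pvLoopA, pvLoopB], by simp [pvLoopA]⟩
  | succ fuel ih =>
    intro i j acc hij hj
    have hlen : ((cs.drop i).take (j-i)).length = j - i := by
      simp [List.length_take, List.length_drop]; omega
    by_cases hgt : (j:Int) - (i:Int) > max
    case neg =>
      have hA : ¬ ((((cs.drop i).take (j-i)).length : Int) > max) := by rw [hlen]; push_cast; omega
      refine ⟨i, j, hij, hj, ?_, ?_⟩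
      · simp only [pvLoopA, pvLoopB]
        rw [if_neg hA, if_neg (show ¬ ((j:Int) - (i:Int) > max) from hgt)]
      · simp only [pvLoopA]
        rw [if_neg hA]
    case pos =>
      have hij2 : i + 2 ≤ j := by omega
      have ht2 : (2:Int) ≤ max + 1 := by omega
      -- e' is the Nat value of e = min(i+max_chars+1, j)
      obtain ⟨e', he'⟩ : ∃ k : Nat, ((k:Int) = min ((i:Int) + max + 1) (j:Int)) :=
        ⟨(min ((i:Int) + max + 1) (j:Int)).toNat, by omega⟩
      have he1 : i + 2 ≤ e' := by omega
      have he2 : e' ≤ j := by omega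
      have hwindow : PySem.List.slice ((cs.drop i).take (j-i)) none (some (max+1))
          = (cs.drop i).take (e' - i) := by
        rw [PySem.List.slice_to _ (by omega : (0:Int) ≤ max+1), List.take_take]
        congr 1; omega
      have hwl : ((cs.drop i).take (e'-i)).length = e' - i := by
        simp [List.length_take, List.length_drop]; omega
      have hlen_i : (cs.take i).length = i := by simp; omega
      have htke : cs.take e' = cs.take i ++ (cs.drop i).take (e'-i) := by
        rw [show e' = i + (e'-i) by omega, List.take_add]
        have h9 : i + (e'-i) - i = e' - i := by omega
        rw [h9]
      have hsplit : ldot (cs.take e')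
          = if 0 ≤ ldot ((cs.drop i).take (e'-i)) then (i:Int) + ldot ((cs.drop i).take (e'-i))
            else ldot (cs.take i) := by
        rw [htke, ldot_append, hlen_i]
      have hp : PySem.List.pyGetD (pvPrevDot cs 0 (-1)) (min ((i:Int) + max + 1) (j:Int) - 1) (-1)
          = ldot (cs.take e') := by
        rw [show min ((i:Int) + max + 1) (j:Int) - 1 = ((e' - 1 : Nat) : Int) by push_cast; omega,
          PySem.List.pyGetD_natCast, pvPrevDot_getD cs (e'-1) 0 (-1) (by omega),
          show e' - 1 + 1 = e' by omega]
        have := ldot_ge (cs.take e')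
        split_ifs <;> omega
      have hrfind : PySem.Chars.rfind
            (PySem.List.slice ((cs.drop i).take (j-i)) none (some (max+1))) ['.']
          = ldot ((cs.drop i).take (e'-i)) := by
        rw [hwindow, rfind_dot]
      have hlti : ldot (cs.take i) < (i:Int) := by
        have h := ldot_lt (cs.take i); rw [hlen_i] at h; exact_mod_cast h
      have hwge := ldot_ge ((cs.drop i).take (e'-i))
      have hwlt : ldot ((cs.drop i).take (e'-i)) < (e':Int) - i := by
        have h := ldot_lt ((cs.drop i).take (e'-i)); rw [hwl] at h
        have h' : (((e' - i : Nat)) : Int) = (e':Int) - i := by push_cast; omega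
        omega
      have hA : (((cs.drop i).take (j-i)).length : Int) > max := by rw [hlen]; push_cast; omega
      by_cases hpos : 0 < ldot ((cs.drop i).take (e'-i))
      · -- a period strictly inside the window: both take the if-branch
        obtain ⟨idxNat, hidxNat⟩ : ∃ k : Nat, ldot ((cs.drop i).take (e'-i)) = (k:Int) :=
          ⟨(ldot ((cs.drop i).take (e'-i))).toNat, by omega⟩
        have hk1 : 1 ≤ idxNat := by omega
        have hkb : i + (idxNat + 1) ≤ e' := by omega
        have hpval : ldot (cs.take e') = (i:Int) + (idxNat:Int) := by
          rw [hsplit, if_pos (by omega), hidxNat]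
        obtain ⟨a₂, b₂, s1, s2, s3, s4, s5, s6⟩ := strip_seg cs (i+(idxNat+1)) j (by omega) hj
        obtain ⟨i', j', g1, g2, g3, g4⟩ := ih a₂ b₂
          (acc ++ [String.ofList (PySem.Chars.strip ((cs.drop i).take (idxNat+1)))]) s2 (by omega)
        have hBstep : pvLoopB cs (pvPrevDot cs 0 (-1)) max (fuel+1) (i:Int) (j:Int) acc
            = pvLoopB cs (pvPrevDot cs 0 (-1)) max fuel (a₂:Int) (b₂:Int)
                (acc ++ [String.ofList (PySem.Chars.strip ((cs.drop i).take (idxNat+1)))]) := by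
          simp only [pvLoopB]
          rw [if_pos (show (j:Int) - (i:Int) > max from hgt), hp, hpval,
            if_pos (show (i:Int) + (idxNat:Int) > (i:Int) by omega),
            show (i:Int) + (idxNat:Int) + 1 = ((i + (idxNat+1) : Nat) : Int) by push_cast; ring,
            s4, s5, PySem.List.slice_natCast, show i + (idxNat+1) - i = idxNat + 1 by omega]
        have hAstep : pvLoopA max (fuel+1) ((cs.drop i).take (j-i)) acc
            = pvLoopA max fuel ((cs.drop a₂).take (b₂-a₂))
                (acc ++ [String.ofList (PySem.Chars.strip ((cs.drop i).take (idxNat+1)))]) := by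
          simp only [pvLoopA]
          rw [if_pos hA, hrfind, hidxNat,
            if_pos (show (idxNat:Int) > 0 by omega),
            show (idxNat:Int) + 1 = ((idxNat + 1 : Nat) : Int) by push_cast; ring,
            PySem.List.slice_to_natCast, PySem.List.slice_from_natCast,
            List.take_take, show min (idxNat+1) (j-i) = idxNat + 1 by omega,
            List.drop_take, List.drop_drop,
            show j - i - (idxNat+1) = j - (idxNat + 1 + i) by omega,
            show idxNat + 1 + i = i + (idxNat+1) by omega, s6]
        exact ⟨i', j', g1, g2, by rw [hBstep, g3, hAstep], by rw [hAstep]; exact g4⟩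
      · -- no period strictly inside the window: both take the else-branch
        obtain ⟨maxNat, hmaxNat⟩ : ∃ k : Nat, max = (k:Int) := ⟨max.toNat, by omega⟩
        have hm1 : 1 ≤ maxNat := by omega
        have hmb : i + maxNat < j := by omega
        have hpval : ¬ (ldot (cs.take e') > (i:Int)) := by
          rw [hsplit]; split_ifs <;> omega
        obtain ⟨a₂, b₂, s1, s2, s3, s4, s5, s6⟩ := strip_seg cs (i+maxNat) j (by omega) hj
        obtain ⟨i', j', g1, g2, g3, g4⟩ := ih a₂ b₂
          (acc ++ [String.ofList (PySem.Chars.strip ((cs.drop i).take maxNat))]) s2 (by omega)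
        have hBstep : pvLoopB cs (pvPrevDot cs 0 (-1)) max (fuel+1) (i:Int) (j:Int) acc
            = pvLoopB cs (pvPrevDot cs 0 (-1)) max fuel (a₂:Int) (b₂:Int)
                (acc ++ [String.ofList (PySem.Chars.strip ((cs.drop i).take maxNat))]) := by
          simp only [pvLoopB]
          rw [if_pos (show (j:Int) - (i:Int) > max from hgt), hp,
            if_neg hpval,
            show (i:Int) + max = ((i + maxNat : Nat) : Int) by rw [hmaxNat]; push_cast; ring,
            s4, s5, PySem.List.slice_natCast, show i + maxNat - i = maxNat by omega]
        have hAstep : pvLoopA max (fuel+1) ((cs.drop i).take (j-i)) acc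
            = pvLoopA max fuel ((cs.drop a₂).take (b₂-a₂))
                (acc ++ [String.ofList (PySem.Chars.strip ((cs.drop i).take maxNat))]) := by
          simp only [pvLoopA]
          rw [if_pos hA, hrfind,
            if_neg (show ¬ (ldot ((cs.drop i).take (e'-i)) > 0) by omega),
            hmaxNat, PySem.List.slice_to_natCast, PySem.List.slice_from_natCast,
            List.take_take, show min maxNat (j-i) = maxNat by omega,
            List.drop_take, List.drop_drop,
            show j - i - maxNat = j - (maxNat + i) by omega,
            show maxNat + i = i + maxNat by omega, s6]
        exact ⟨i', j', g1, g2, by rw [hBstep, g3, hAstep], by rw [hAstep]; exact g4⟩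

-- ===== VERDICT (by name: the statement is the Claim_ definition above) =====
theorem split_text_by_punctuation_spec : Claim_equal_split_text_by_punctuation := by
  intro text max_chars _ hpre
  unfold Spec_split_text_by_punctuation
  simp only [split_text_by_punctuation, split_text_by_punctuation_alt]
  obtain ⟨i', j', hij, hjn, hB, hrem⟩ :=
    loop_eq text.toList max_chars hpre (text.toList.length + 1) 0 text.toList.length []
      (Nat.zero_le _) le_rfl
  simp only [List.drop_zero, Nat.sub_zero, List.take_length, Nat.cast_zero] at hB hrem
  rw [hB, hrem]
  have hlen : (((text.toList.drop i').take (j'-i')).length : Int) = ((j' : Int) - i') := by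
    rw [List.length_take, List.length_drop]; push_cast; omega
  have hslice : PySem.List.slice text.toList (some (i':Int)) (some (j':Int))
      = (text.toList.drop i').take (j'-i') := by
    rw [PySem.List.slice_natCast]
  simp only [hlen, hslice]
  by_cases h : (i' : Int) < (j' : Int)
  · rw [if_pos (by omega), if_pos (by omega)]
  · rw [if_neg (by omega), if_neg (by omega)]
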